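-- pv_equiv track=rewrite | github.com/MarcJimenez99/VernamCipher | decryption_code.py | random_generator
-- ===== SOURCE A (Python) =====
-- def random_generator(cipher_list, root):
--     i = 0
--     A = 7
--     B = 0
--     N = 257
--     random_list = []
--     random_list.append(root)
--     while (i < len(cipher_list)):
--         temp = ((random_list[i] * A) + B) % N
--         random_list.append(temp)
--         i += 1
--     return random_list
-- ===== SOURCE B (Python) =====
-- def random_generator(cipher_list, root):
--     # Build the keystream back-to-front: each position i >= 1 gets the closed
--     # form (root * pow(7, i, 257)) % 257 computed independently by modular
--     # exponentiation (no element-to-element recurrence), counting i downward,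
--     # then the seed is appended and the whole list reversed.
--     acc = []
--     i = len(cipher_list)
--     while i >= 1:
--         acc.append((root * pow(7, i, 257)) % 257)
--         i -= 1
--     acc.append(root)
--     acc.reverse()
--     return acc
-- ===== Notes on version B (the rewrite author's own statement) =====
-- stated objective: alternative
-- what changed: B replaces A's element-to-element LCG recurrence (forward loop reading the previous list element) by building the list back-to-front: each position's value is computed independently from the closed form (root * pow(7, i, 257)) % 257 while counting i down, then the list is reversed.
import Mathlib
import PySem

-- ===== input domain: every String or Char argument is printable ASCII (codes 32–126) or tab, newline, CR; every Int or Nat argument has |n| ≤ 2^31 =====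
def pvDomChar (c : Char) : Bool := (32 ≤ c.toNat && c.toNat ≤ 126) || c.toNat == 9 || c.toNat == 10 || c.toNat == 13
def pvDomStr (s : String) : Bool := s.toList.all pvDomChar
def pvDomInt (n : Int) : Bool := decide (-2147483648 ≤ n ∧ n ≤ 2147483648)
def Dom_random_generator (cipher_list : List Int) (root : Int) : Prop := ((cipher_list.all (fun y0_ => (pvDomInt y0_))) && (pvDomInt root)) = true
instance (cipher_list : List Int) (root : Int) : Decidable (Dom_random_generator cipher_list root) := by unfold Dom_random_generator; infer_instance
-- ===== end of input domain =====

-- B drops A's element-to-element LCG recurrence: it builds the list back-to-front,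
-- computing each term independently from the closed form root * 7^i mod 257,
-- then reverses; objective: alternative.

-- ===== PORT A =====
-- loop body of A's while loop: random_list.append(((random_list[i] * 7) + 0) % 257);
-- the index i is always in range (the list has i+1 elements), so the default 0 of pyGetD is never used
def rgStep (random_list : List Int) (i : Int) : List Int :=
  random_list ++ [PySem.Int.mod ((PySem.List.pyGetD random_list i 0) * 7 + 0) 257]

def random_generator (cipher_list : List Int) (root : Int) : List Int :=
  (PySem.List.pyRange 0 (cipher_list.length : Int) 1).foldl rgStep [root]

-- ===== PORT B =====
-- B's while loop counts i down from len(cipher_list) to 1, appending the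
-- closed-form term (root * pow(7, i, 257)) % 257 to acc, then appends root and
-- reverses; ported as structural recursion on the loop counter i with the
-- accumulator acc.
def rgDown (root : Int) : Nat → List Int → List Int
  | 0, acc => acc ++ [root]
  | i + 1, acc =>
    rgDown root i (acc ++ [PySem.Int.mod (root * PySem.Int.powMod 7 (i + 1) 257) 257])

def random_generator_alt (cipher_list : List Int) (root : Int) : List Int :=
  (rgDown root cipher_list.length []).reverse

-- ===== PRECONDITION & SPEC =====
def Spec_random_generator (cipher_list : List Int) (root : Int) (out : List Int) : Prop := out = random_generator_alt cipher_list root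
instance (cipher_list : List Int) (root : Int) (out : List Int) : Decidable (Spec_random_generator cipher_list root out) := by unfold Spec_random_generator; infer_instance

-- ===== CLAIM (what is proved, stated in full; the proofs are below) =====
def Claim_equal_random_generator : Prop := ∀ (cipher_list : List Int) (root : Int), Dom_random_generator cipher_list root → Spec_random_generator cipher_list root (random_generator cipher_list root)

-- ===== LEMMAS AND PROOFS =====

-- closed form of the i-th keystream element (i ≥ 1)
def rgClosed (root : Int) (e : Nat) : Int := (root * 7 ^ e) % 257

lemma rg_mod_eq (a : Int) : PySem.Int.mod a 257 = a % 257 :=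
  PySem.Int.mod_eq_emod_of_pos (by norm_num)

lemma rg_absorb (x y : Int) : (x * (y % 257)) % 257 = (x * y) % 257 := by
  conv_rhs => rw [Int.mul_emod]
  rw [Int.mul_emod, Int.emod_emod_of_dvd _ (dvd_refl _)]

-- proof helper: the descending list of closed-form terms the accumulator collects
def rgDesc (root : Int) : Nat → List Int
  | 0 => []
  | i + 1 => rgClosed root (i + 1) :: rgDesc root i

lemma rgDown_eq (root : Int) (i : Nat) (acc : List Int) :
    rgDown root i acc = acc ++ rgDesc root i ++ [root] := by
  induction i generalizing acc with
  | zero => simp [rgDown, rgDesc]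
  | succ k ih =>
    unfold rgDown rgDesc
    rw [PySem.Int.powMod_eq_emod _ _ (by norm_num : (0:Int) < 257), rg_mod_eq, rg_absorb, ih]
    simp [rgClosed]

lemma rgDesc_reverse (root : Int) (i : Nat) :
    (rgDesc root i).reverse = (List.range i).map (fun e => rgClosed root (e + 1)) := by
  induction i with
  | zero => simp [rgDesc]
  | succ k ih => simp [rgDesc, ih, List.range_succ]

lemma rg_getD (root : Int) (k : Nat) :
    (root :: (List.range k).map (fun e => rgClosed root (e + 1))).getD k 0
      = if k = 0 then root else rgClosed root k := by
  cases k with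
  | zero => simp
  | succ j =>
    simp only [List.getD_cons_succ, Nat.succ_ne_zero, if_false]
    rw [List.getD_eq_getElem?_getD]
    simp

lemma rg_step_val (root : Int) (k : Nat) :
    PySem.Int.mod ((if k = 0 then root else rgClosed root k) * 7 + 0) 257
      = rgClosed root (k + 1) := by
  rw [add_zero, rg_mod_eq]
  by_cases hk : k = 0
  · subst hk
    simp [rgClosed]
  · rw [if_neg hk]
    unfold rgClosed
    rw [pow_succ, ← mul_assoc]
    conv_lhs => rw [Int.mul_emod, Int.emod_emod_of_dvd _ (dvd_refl _)]
    conv_rhs => rw [Int.mul_emod]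

lemma rg_loop_eq (root : Int) (n : Nat) :
    (PySem.List.pyRange 0 (n : Int) 1).foldl rgStep [root]
      = root :: (List.range n).map (fun e => rgClosed root (e + 1)) := by
  induction n with
  | zero => simp [PySem.List.pyRange_one_eq_nil]
  | succ k ih =>
    have hsplit : PySem.List.pyRange 0 ((k : Nat) + 1 : Int) 1
        = PySem.List.pyRange 0 (k : Int) 1 ++ [(k : Int)] :=
      PySem.List.pyRange_one_succ_right (by positivity)
    have hc : (((k : Nat) + 1 : Nat) : Int) = ((k : Nat) + 1 : Int) := by push_cast; ring
    rw [hc, hsplit, List.foldl_append, ih]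
    unfold rgStep
    have hget : PySem.List.pyGetD
        (root :: (List.range k).map (fun e => rgClosed root (e + 1))) (k : Int) 0
        = if k = 0 then root else rgClosed root k := by
      rw [PySem.List.pyGetD_natCast, rg_getD]
    simp only [List.foldl_cons, List.foldl_nil, hget, rg_step_val]
    rw [List.range_succ, List.map_append]
    simp

theorem random_generator_spec : Claim_equal_random_generator := by
  intro cipher_list root _
  unfold Spec_random_generator random_generator random_generator_alt
  rw [rg_loop_eq, rgDown_eq]
  simp [rgDesc_reverse]
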